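-- pv_equiv track=rewrite | github.com/kimikhyeon1/Algorithm | 프로그래머스/0/120882. 등수 매기기/등수 매기기.py | solution
-- ===== SOURCE A (Python) =====
-- def solution(score):
--     array = []
--     for i in score:
--         sum_score = 0
--         for j in i:
--             sum_score += j
--         array.append(sum_score)
--
--     rating_dic = {}
--     rating = 1
--     array.sort(reverse = True)
--
--     for i in array:
--         if i not in rating_dic:
--             rating_dic[i] = rating
--         rating += 1
--
--     answer = []
--     for i in score:
--         answer.append(rating_dic[sum(i)])
--     return answer
-- ===== SOURCE B (Python) =====
-- def solution(score):
--     totals = [sum(row) for row in score]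
--     return [1 + sum(1 for u in totals if u > t) for t in totals]
-- ===== Notes on version B (the rewrite author's own statement) =====
-- stated objective: simpler
-- what changed: Replaces the sort-then-first-occurrence rating dictionary with a direct per-student count of strictly greater totals (rank = 1 + number of higher totals), dropping the sort and the dict entirely.
import Mathlib
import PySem

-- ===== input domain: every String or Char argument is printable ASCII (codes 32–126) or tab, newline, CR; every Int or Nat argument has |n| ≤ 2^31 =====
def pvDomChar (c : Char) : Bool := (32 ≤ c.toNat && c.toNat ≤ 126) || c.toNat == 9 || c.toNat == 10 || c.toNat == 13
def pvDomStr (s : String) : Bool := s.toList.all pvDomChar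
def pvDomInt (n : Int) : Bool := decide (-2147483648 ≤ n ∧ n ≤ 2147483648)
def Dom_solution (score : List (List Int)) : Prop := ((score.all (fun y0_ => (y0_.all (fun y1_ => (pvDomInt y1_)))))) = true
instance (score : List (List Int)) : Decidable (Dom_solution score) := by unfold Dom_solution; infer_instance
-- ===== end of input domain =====

-- B drops A's sort and rating dictionary: rank = 1 + number of strictly greater totals (simpler, same values).

-- ===== PORT A =====
def solution (score : List (List Int)) : List Int :=
  let array := score.foldl (fun arr i => arr ++ [i.foldl (fun s j => s + j) 0]) []
  let array := PySem.List.sorted array (fun x => x) true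
  let st := array.foldl
      (fun (p : PySem.Dict Int Int × Int) i =>
        ((if p.1.contains i then p.1 else p.1.insert i p.2), p.2 + 1))
      (PySem.Dict.empty, 1)
  -- rating_dic[sum(i)]: the key is always present (sum(i) ∈ array), so the lookup never raises
  score.foldl (fun ans i => ans ++ [(st.1.get? (i.foldl (· + ·) 0)).getD 0]) []

-- ===== PORT B =====
def solution_alt (score : List (List Int)) : List Int :=
  let totals := score.map (fun row => row.foldl (· + ·) 0)
  totals.map (fun t => 1 + (totals.countP (fun u => decide (t < u)) : Int))

-- ===== PRECONDITION & SPEC =====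
def Spec_solution (score : List (List Int)) (out : List Int) : Prop := out = solution_alt score
instance (score : List (List Int)) (out : List Int) : Decidable (Spec_solution score out) := by unfold Spec_solution; infer_instance

-- ===== CLAIM (what is proved, stated in full; the proofs are below) =====
def Claim_equal_solution : Prop := ∀ (score : List (List Int)), Dom_solution score → Spec_solution score (solution score)

-- ===== LEMMAS AND PROOFS =====

-- append-accumulator foldl is map
theorem foldl_append_map {α β : Type} (f : α → β) (l : List α) (acc : List β) :
    l.foldl (fun arr i => arr ++ [f i]) acc = acc ++ l.map f := by
  induction l generalizing acc with
  | nil => simp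
  | cons h t ih => simp [List.foldl_cons, ih, List.append_assoc]

-- the rating dictionary: first-come lookup = start rating + index of first occurrence
theorem dict_build_get (s : List Int) (d : PySem.Dict Int Int) (r : Int) (t : Int) :
    ((s.foldl (fun (p : PySem.Dict Int Int × Int) i =>
        ((if p.1.contains i then p.1 else p.1.insert i p.2), p.2 + 1)) (d, r)).1).get? t =
      if d.contains t then d.get? t
      else if t ∈ s then some (r + (s.idxOf t : Int)) else none := by
  induction s generalizing d r with
  | nil =>
    by_cases hc : d.contains t
    · simp [hc]
    · simp [hc, (PySem.Dict.get?_eq_none_iff_contains d t).mpr (by simpa using hc)]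
  | cons h tl ih =>
    simp only [List.foldl_cons]
    by_cases hh : d.contains h
    · rw [if_pos hh, ih]
      by_cases hc : d.contains t
      · simp [hc]
      · by_cases ht : t = h
        · subst ht; exact absurd hh hc
        · have hb : (h == t) = false := beq_eq_false_iff_ne.mpr (fun e => ht e.symm)
          by_cases hm : t ∈ tl
          · simp only [hc, Bool.false_eq_true, if_false, hm, if_pos,
              List.mem_cons, or_true, ht]
            have : (h :: tl).idxOf t = tl.idxOf t + 1 := by simp [List.idxOf_cons, hb]
            rw [this]; push_cast; ring_nf
          · have hm' : t ∉ (h :: tl) := by simp [ht, hm]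
            simp [hc, hm, hm']
    · rw [if_neg hh, ih]
      by_cases hc : d.contains t
      · have hne : t ≠ h := by rintro rfl; rw [hc] at hh; exact hh rfl
        have hct : (d.insert h r).contains t = true := by
          simp [PySem.Dict.contains_insert, hc]
        rw [if_pos hct, if_pos hc, PySem.Dict.get?_insert_of_ne _ _ hne]
      · by_cases ht : t = h
        · subst ht
          rw [if_pos (PySem.Dict.contains_insert_self d t r),
            PySem.Dict.get?_insert_self, if_neg hc]
          simp [List.idxOf_cons_self]
        · have hb : (t == h) = false := beq_eq_false_iff_ne.mpr ht
          have hb' : (h == t) = false := beq_eq_false_iff_ne.mpr (fun e => ht e.symm)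
          have hct : (d.insert h r).contains t = false := by
            simp [PySem.Dict.contains_insert, hb]
            simpa using hc
          rw [hct]
          simp only [Bool.false_eq_true, if_false, if_neg hc]
          by_cases hm : t ∈ tl
          · have hm' : t ∈ (h :: tl) := List.mem_cons_of_mem _ hm
            rw [if_pos hm, if_pos hm']
            have : (h :: tl).idxOf t = tl.idxOf t + 1 := by simp [List.idxOf_cons, hb']
            rw [this]; push_cast; ring_nf
          · have hm' : t ∉ (h :: tl) := by simp [ht, hm]
            rw [if_neg hm, if_neg hm']

-- in a descending list the index of the first occurrence counts the strictly greater elements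
theorem idxOf_eq_countP_gt (s : List Int) (hp : s.Pairwise (fun a b => b ≤ a)) (t : Int)
    (ht : t ∈ s) : (s.idxOf t : Int) = (s.countP (fun u => decide (t < u)) : Int) := by
  induction s with
  | nil => cases ht
  | cons h tl ih =>
    have hle : ∀ x ∈ tl, x ≤ h := (List.pairwise_cons.mp hp).1
    by_cases hth : t = h
    · subst hth
      have hz : tl.countP (fun u => decide (t < u)) = 0 := by
        rw [List.countP_eq_zero]
        intro a ha
        simpa using not_lt.mpr (hle a ha)
      simp [List.idxOf_cons_self, hz]
    · have hm : t ∈ tl := by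
        rcases List.mem_cons.mp ht with h1 | h1
        · exact absurd h1 hth
        · exact h1
      have hlt : t < h := lt_of_le_of_ne (hle t hm) hth
      have hih := ih (List.pairwise_cons.mp hp).2 hm
      have hb : (h == t) = false := beq_eq_false_iff_ne.mpr (fun e => hth e.symm)
      have hidx : (h :: tl).idxOf t = tl.idxOf t + 1 := by simp [List.idxOf_cons, hb]
      rw [hidx, List.countP_cons]
      simp only [decide_eq_true_eq, hlt, if_pos]
      push_cast
      omega

theorem solution_eq (score : List (List Int)) : solution score = solution_alt score := by
  unfold solution solution_alt
  simp only []
  have harr : score.foldl (fun arr i => arr ++ [i.foldl (fun s j => s + j) 0]) []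
      = score.map (fun row => row.foldl (· + ·) 0) := by
    rw [foldl_append_map]; simp
  rw [harr, foldl_append_map]
  simp only [List.nil_append, List.map_map]
  apply List.map_congr_left
  intro i hi
  simp only [Function.comp]
  set totals := score.map (fun row => row.foldl (· + ·) 0) with htot
  set s := PySem.List.sorted totals (fun x => x) true with hs
  have hperm : s.Perm totals := PySem.List.sorted_perm totals (fun x => x) true
  have hmem : (i.foldl (fun a b => a + b) 0) ∈ s :=
    hperm.mem_iff.mpr (List.mem_map.mpr ⟨i, hi, rfl⟩)
  rw [dict_build_get]
  rw [if_neg (by simp), if_pos hmem]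
  have hpair : s.Pairwise (fun a b => b ≤ a) := by
    simpa using PySem.List.sorted_pairwise_rev totals (fun x => x)
  rw [idxOf_eq_countP_gt s hpair _ hmem, hperm.countP_eq]
  simp

-- ===== VERDICT (by name: the statement is the Claim_ definition above) =====
theorem solution_spec : Claim_equal_solution := by
  intro score _
  unfold Spec_solution
  exact solution_eq score
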